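-- pv_equiv track=rewrite | github.com/beMatthew7/UBB-FMI | Anul I/Semestrul I/FP/Laborator 13/lab_13_it.py | find_subsequences_bkt_iter
-- ===== SOURCE A (Python) =====
-- def has_common_digit(num1, num2):
--     """
--     Verifica daca au cel putin o cifra comuna
--     :param :num1 -primul numar
--     :param :num2 - al doilea numar
--     :return: True daca cele doua numere au o cifra comuna
--     :return: False in caz contrar
--     """
--     return bool(set(str(num1)) & set(str(num2)))
--
-- def find_subsequences_bkt_iter(arr):
--     """
--     Găsește toate subsecvențele valide folosind backtracking iterativ.
--     :param arr: Lista inițială de numere.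
--     :return: Lista subsecvențelor valide.
--     """
--     n = len(arr)
--     result = []
--     x = [-1]
--
--     while len(x) > 0:
--         choosed = False
--         while not choosed and x[-1] < n - 1:
--             x[-1] += 1
--             if len(x) == 1 or (arr[x[-2]] < arr[x[-1]] and has_common_digit(arr[x[-2]], arr[x[-1]])):
--                 choosed = True
--
--         if choosed:
--             if len(x) > 2:
--                 result.append([arr[i] for i in x])
--             x.append(-1)
--         else:
--             x = x[:-1]
--
--     return result
-- ===== SOURCE B (Python) =====
-- def has_common_digit(num1, num2):
--     """
--     Verifica daca au cel putin o cifra comuna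
--     :param :num1 -primul numar
--     :param :num2 - al doilea numar
--     :return: True daca cele doua numere au o cifra comuna
--     :return: False in caz contrar
--     """
--     return bool(set(str(num1)) & set(str(num2)))
--
-- def find_subsequences_bkt_iter(arr):
--     """
--     Gaseste toate subsecventele valide prin backtracking recursiv (pre-order DFS).
--     :param arr: Lista initiala de numere.
--     :return: Lista subsecventelor valide.
--     """
--     n = len(arr)
--
--     def ok(path, i):
--         if not path:
--             return True
--         prev = arr[path[-1]]
--         return prev < arr[i] and has_common_digit(prev, arr[i])
--
--     def bkt(path):
--         out = []
--         for i in range(n):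
--             if ok(path, i):
--                 new_path = path + [i]
--                 if len(new_path) > 2:
--                     out.append([arr[j] for j in new_path])
--                 out.extend(bkt(new_path))
--         return out
--
--     return bkt([])
-- ===== Notes on version B (the rewrite author's own statement) =====
-- stated objective: simpler
-- what changed: A's hand-maintained explicit-stack backtracking (a while loop mutating a list of counters, with an inner advance loop and push/pop) is replaced by a plain recursive pre-order DFS bkt(path) that scans all candidate indices in order, records paths of length > 2 on entry, and recurses; same enumeration order and values.
import Mathlib
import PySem

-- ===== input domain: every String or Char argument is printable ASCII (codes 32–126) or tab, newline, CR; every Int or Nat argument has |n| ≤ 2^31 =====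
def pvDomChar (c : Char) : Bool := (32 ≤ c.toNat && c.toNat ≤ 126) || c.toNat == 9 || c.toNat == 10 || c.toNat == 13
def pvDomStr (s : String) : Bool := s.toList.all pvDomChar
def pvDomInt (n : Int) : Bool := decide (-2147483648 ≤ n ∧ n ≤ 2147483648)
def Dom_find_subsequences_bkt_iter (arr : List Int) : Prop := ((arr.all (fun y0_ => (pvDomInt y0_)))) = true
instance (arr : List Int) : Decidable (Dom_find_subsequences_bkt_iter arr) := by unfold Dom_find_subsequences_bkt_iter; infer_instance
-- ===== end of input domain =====

-- B replaces A's hand-maintained explicit-stack backtracking loop by plain recursive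
-- pre-order DFS backtracking (objective: simpler; same enumeration order and values).

-- `arr[i]` for an index that is in range on every reachable access (Python would raise
-- IndexError otherwise; such accesses never occur in either program).
def pvGet (arr : List Int) (i : Int) : Int := (PySem.List.pyGet? arr i).getD 0

-- shared module helper: bool(set(str(num1)) & set(str(num2)))
def has_common_digit (num1 num2 : Int) : Bool :=
  !(PySem.Set.inter (PySem.Set.ofList (PySem.Int.toStr num1).toList)
      (PySem.Set.ofList (PySem.Int.toStr num2).toList)).isEmpty

-- ===== PORT A =====

-- `len(x) == 1 or (arr[x[-2]] < arr[x[-1]] and has_common_digit(arr[x[-2]], arr[x[-1]]))`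
def pvCondA (arr : List Int) (x : List Int) : Bool :=
  x.length == 1 ||
    (decide (pvGet arr (pvGet x (-2)) < pvGet arr (pvGet x (-1))) &&
      has_common_digit (pvGet arr (pvGet x (-2))) (pvGet arr (pvGet x (-1))))

-- inner `while not choosed and x[-1] < n - 1` loop; gas = number of remaining possible
-- increments of x[-1], supplied exactly by pvInnerLoopA (a pure totality guard)
def pvInnerA (arr : List Int) : Nat → List Int → Bool × List Int
  | 0, x => (false, x)
  | g + 1, x =>
    let last := pvGet x (-1)
    if last < (arr.length : Int) - 1 then
      -- x[-1] += 1
      let x' := x.dropLast ++ [last + 1]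
      if pvCondA arr x' then (true, x') else pvInnerA arr g x'
    else (false, x)

def pvInnerLoopA (arr : List Int) (x : List Int) : Bool × List Int :=
  pvInnerA arr ((arr.length : Int) - 1 - pvGet x (-1)).toNat x

-- outer `while len(x) > 0` loop; fuel is a pure totality guard, chosen large enough below
def pvOuterA (arr : List Int) : Nat → List Int → List (List Int) → List (List Int)
  | 0, _, result => result
  | fuel + 1, x, result =>
    if 0 < x.length then
      match pvInnerLoopA arr x with
      | (true, x') =>
        -- if len(x) > 2: result.append([arr[i] for i in x]);  x.append(-1)
        let result' := if 2 < x'.length then result ++ [x'.map (fun i => pvGet arr i)] else result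
        pvOuterA arr fuel (x' ++ [-1]) result'
      | (false, x') =>
        -- x = x[:-1]
        pvOuterA arr fuel x'.dropLast result
    else result

def find_subsequences_bkt_iter (arr : List Int) : List (List Int) :=
  pvOuterA arr ((arr.length + 2) ^ (arr.length + 2)) [-1] []

-- ===== PORT B =====

-- `ok(path, i)`: accept candidate index i after path
def pvOkB (arr : List Int) (path : List Int) (i : Int) : Bool :=
  match path.getLast? with
  | none => true
  | some j =>
    decide (pvGet arr j < pvGet arr i) && has_common_digit (pvGet arr j) (pvGet arr i)

-- `bkt(path)`: recursive DFS over the candidate list `is` (the rest of `range(n)`);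
-- fuel is a pure totality guard for the recursion depth, supplied at the top call
def pvBktB (arr : List Int) : Nat → List Int → List Int → List (List Int)
  | _, _, [] => []
  | fuel, path, i :: is =>
    if pvOkB arr path i then
      let newPath := path ++ [i]
      (if 2 < newPath.length then [newPath.map (fun j => pvGet arr j)] else []) ++
        (match fuel with
          | 0 => []
          | f + 1 => pvBktB arr f newPath (PySem.List.pyRange 0 (arr.length : Int) 1)) ++
        pvBktB arr fuel path is
    else pvBktB arr fuel path is
  termination_by fuel _ is => (fuel, is.length)

def find_subsequences_bkt_iter_alt (arr : List Int) : List (List Int) :=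
  pvBktB arr (arr.length + 1) [] (PySem.List.pyRange 0 (arr.length : Int) 1)

-- ===== PRECONDITION & SPEC =====
def Spec_find_subsequences_bkt_iter (arr : List Int) (out : List (List Int)) : Prop := out = find_subsequences_bkt_iter_alt arr
instance (arr : List Int) (out : List (List Int)) : Decidable (Spec_find_subsequences_bkt_iter arr out) := by unfold Spec_find_subsequences_bkt_iter; infer_instance

-- ===== CLAIM (what is proved, stated in full; the proofs are below) =====
def Claim_equal_find_subsequences_bkt_iter : Prop := ∀ (arr : List Int), Dom_find_subsequences_bkt_iter arr → Spec_find_subsequences_bkt_iter arr (find_subsequences_bkt_iter arr)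

-- ===== LEMMAS AND PROOFS =====

-- the candidate list still to scan at a level whose counter is c: range(n) from c+1 on
def pvRng (arr : List Int) (c : Int) : List Int :=
  (PySem.List.pyRange 0 (arr.length : Int) 1).drop (c + 1).toNat

-- output still to be produced by the levels BELOW the top of the stack
def pvLevelsUpR (arr : List Int) : List Int → List (List Int)
  | [] => []
  | c :: r => pvBktB arr (arr.length + 1 - r.length) r.reverse (pvRng arr c) ++ pvLevelsUpR arr r

-- termination potential of A's machine state
def pvWgt (n : Nat) (c : Int) : Nat := ((n : Int) - c).toNat
def pvPhiA (n : Nat) : List Int → Nat → Nat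
  | [], _ => 0
  | c :: t, e => pvWgt n c * (n + 2) ^ e + pvPhiA n t (e - 1)
def pvPhi (arr : List Int) (x : List Int) : Nat := pvPhiA arr.length x (arr.length + 1)

-- invariant: below the counter, the stack is an accepted chain of in-range indices
def pvGood (arr : List Int) (X : List Int) : Prop :=
  (∀ a ∈ X, 0 ≤ a ∧ a < (arr.length : Int)) ∧
    List.IsChain (fun a b => pvOkB arr [a] b = true) X

lemma pvGet_concat_neg_one (X : List Int) (c : Int) : pvGet (X ++ [c]) (-1) = c := by
  have h2 : -((X ++ [c]).length : Int) ≤ -1 := by simp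
  simp only [pvGet, PySem.List.pyGet?, PySem.List.pyIdx?, if_neg (by norm_num : ¬ (0:Int) ≤ -1),
    if_pos h2]
  have h3 : (X ++ [c]).length - (-(-1:Int)).toNat = X.length := by simp
  rw [h3]
  simp

lemma pvGet_concat2_neg_two (X : List Int) (j i : Int) : pvGet (X ++ [j] ++ [i]) (-2) = j := by
  have h2 : -((X ++ [j] ++ [i]).length : Int) ≤ -2 := by simp
  simp only [pvGet, PySem.List.pyGet?, PySem.List.pyIdx?, if_neg (by norm_num : ¬ (0:Int) ≤ -2),
    if_pos h2]
  have h3 : (X ++ [j] ++ [i]).length - (-(-2:Int)).toNat = X.length := by simp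
  rw [h3]
  simp [List.append_assoc]


lemma pvOkB_last (arr X : List Int) (a b : Int) (h : X.getLast? = some a) :
    pvOkB arr X b = pvOkB arr [a] b := by
  simp [pvOkB, h]

lemma pvCondA_concat (arr X : List Int) (i : Int) :
    pvCondA arr (X ++ [i]) = pvOkB arr X i := by
  rcases List.eq_nil_or_concat X with rfl | ⟨Y, j, rfl⟩
  · simp [pvCondA, pvOkB]
  · simp only [List.concat_eq_append]
    have hlen : ((Y ++ [j] ++ [i]).length == 1) = false := by simp [List.length_append]
    rw [pvCondA, pvGet_concat2_neg_two, pvGet_concat_neg_one, pvOkB_last arr _ j i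
      (List.getLast?_concat), hlen]
    simp [pvOkB]

lemma pvGood_length_le (arr X : List Int) (h : pvGood arr X) : X.length ≤ arr.length := by
  rcases h with ⟨hb, hch⟩
  have hlt : List.IsChain (fun a b : Int => pvGet arr a < pvGet arr b) X := by
    refine hch.imp ?_
    intro a b hab
    simp only [pvOkB, List.getLast?_singleton, Bool.and_eq_true, decide_eq_true_eq] at hab
    exact hab.1
  have hpw : X.Pairwise (fun a b : Int => pvGet arr a < pvGet arr b) := by
    haveI : Trans (fun a b : Int => pvGet arr a < pvGet arr b)
        (fun a b : Int => pvGet arr a < pvGet arr b)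
        (fun a b : Int => pvGet arr a < pvGet arr b) := ⟨fun hab hbc => lt_trans hab hbc⟩
    exact List.isChain_iff_pairwise.mp hlt
  have hnd : X.Nodup := hpw.imp (fun {a b} hab => by rintro rfl; exact lt_irrefl _ hab)
  calc X.length = X.toFinset.card := (List.toFinset_card_of_nodup hnd).symm
    _ ≤ (Finset.Ico (0 : Int) arr.length).card := by
        refine Finset.card_le_card ?_
        intro a ha
        rw [List.mem_toFinset] at ha
        have := hb a ha
        simp only [Finset.mem_Ico]
        exact this
    _ = arr.length := by simp [Int.card_Ico]

lemma pvRange_length (arr : List Int) :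
    (PySem.List.pyRange 0 (arr.length : Int) 1).length = arr.length := by
  rw [PySem.List.pyRange_zero_natCast]
  simp

lemma pvRng_nil (arr : List Int) (c : Int) (h : (arr.length : Int) - 1 ≤ c) :
    pvRng arr c = [] := by
  apply List.drop_eq_nil_of_le
  rw [pvRange_length]
  omega

lemma pvRng_neg_one (arr : List Int) : pvRng arr (-1) = PySem.List.pyRange 0 (arr.length : Int) 1 := by
  simp [pvRng]

lemma pvRng_cons (arr : List Int) (c : Int) (hc : -1 ≤ c) (h : c + 1 < (arr.length : Int)) :
    pvRng arr c = (c + 1) :: pvRng arr (c + 1) := by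
  unfold pvRng
  rw [PySem.List.pyRange_zero_natCast]
  rw [List.range_eq_range', ← List.map_drop, ← List.map_drop, List.drop_range', List.drop_range']
  have hk : (c + 1 + 1).toNat = (c + 1).toNat + 1 := by omega
  simp only [zero_add, mul_one, hk]
  have hl : arr.length - (c + 1).toNat = (arr.length - ((c + 1).toNat + 1)) + 1 := by omega
  rw [hl, List.range'_succ, List.map_cons]
  congr 1
  omega

lemma pvInner_scan (arr : List Int) (X : List Int) (f : Nat) :
    ∀ g (c : Int), -1 ≤ c → g = ((arr.length : Int) - 1 - c).toNat →
      (∃ i : Int, pvInnerA arr g (X ++ [c]) = (true, X ++ [i]) ∧ c < i ∧ 0 ≤ i ∧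
          i < (arr.length : Int) ∧ pvOkB arr X i = true ∧
          pvBktB arr (f + 1) X (pvRng arr c) =
            (if 2 < (X ++ [i]).length then [(X ++ [i]).map (fun j => pvGet arr j)] else []) ++
              pvBktB arr f (X ++ [i]) (PySem.List.pyRange 0 (arr.length : Int) 1) ++
              pvBktB arr (f + 1) X (pvRng arr i)) ∨
      (∃ z, pvInnerA arr g (X ++ [c]) = (false, z) ∧ z.dropLast = X ∧
        pvBktB arr (f + 1) X (pvRng arr c) = []) := by
  intro g
  induction g with
  | zero =>
    intro c hc hg
    right
    refine ⟨X ++ [c], by simp [pvInnerA], List.dropLast_concat, ?_⟩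
    rw [pvRng_nil arr c (by omega), pvBktB]
  | succ g ih =>
    intro c hc hg
    have hlt : c < (arr.length : Int) - 1 := by omega
    have hstep : pvInnerA arr (g + 1) (X ++ [c]) =
        (if pvCondA arr (X ++ [c + 1]) then (true, X ++ [c + 1])
         else pvInnerA arr g (X ++ [c + 1])) := by
      rw [pvInnerA]
      simp only [pvGet_concat_neg_one, if_pos hlt, List.dropLast_concat]
    have hrng : pvRng arr c = (c + 1) :: pvRng arr (c + 1) :=
      pvRng_cons arr c hc (by omega)
    by_cases hcond : pvCondA arr (X ++ [c + 1]) = true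
    · left
      have hok : pvOkB arr X (c + 1) = true := by rw [← pvCondA_concat]; exact hcond
      refine ⟨c + 1, ?_, by omega, by omega, by omega, hok, ?_⟩
      · rw [hstep, if_pos hcond]
      · rw [hrng, pvBktB, if_pos hok]
    · have hokf : pvOkB arr X (c + 1) = false := by
        rw [← pvCondA_concat]; exact Bool.eq_false_iff.mpr hcond
      have hskip : pvBktB arr (f + 1) X (pvRng arr c) = pvBktB arr (f + 1) X (pvRng arr (c + 1)) := by
        rw [hrng, pvBktB, hokf]
        simp
      rcases ih (c + 1) (by omega) (by omega) with
        ⟨i, heq, hci, h0, hin, hok, hscan⟩ | ⟨z, heq, hdl, hnil⟩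
      · left
        exact ⟨i, by rw [hstep, if_neg (by simp [hcond]), heq], by omega, h0, hin, hok,
          by rw [hskip]; exact hscan⟩
      · right
        exact ⟨z, by rw [hstep, if_neg (by simp [hcond]), heq], hdl, by rw [hskip]; exact hnil⟩

lemma pvPhiA_append (n : Nat) (X : List Int) (c : Int) :
    ∀ e, pvPhiA n (X ++ [c]) e = pvPhiA n X e + pvWgt n c * (n + 2) ^ (e - X.length) := by
  induction X with
  | nil => intro e; simp [pvPhiA]
  | cons x t ih =>
    intro e
    simp only [List.cons_append, pvPhiA, ih (e - 1), List.length_cons]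
    have h : e - 1 - t.length = e - (t.length + 1) := by omega
    rw [h, Nat.add_assoc]

lemma pvPhi_push (arr X : List Int) (c i : Int) (_hc : -1 ≤ c) (hci : c < i)
    (hi : i < (arr.length : Int)) (hX : X.length ≤ arr.length) :
    pvPhi arr ((X ++ [i]) ++ [-1]) < pvPhi arr (X ++ [c]) := by
  unfold pvPhi
  rw [pvPhiA_append, pvPhiA_append, pvPhiA_append]
  set n := arr.length with hn
  have hlen : (X ++ [i]).length = X.length + 1 := by simp
  rw [hlen]
  set e1 := n + 1 - X.length with he1def
  have he1 : 1 ≤ e1 := by omega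
  have hP : 0 < (n + 2) ^ (e1 - 1) := pow_pos (by omega) _
  have hwc : pvWgt n i + 1 ≤ pvWgt n c := by simp only [pvWgt]; omega
  have hwm1 : pvWgt n (-1) = n + 1 := by simp [pvWgt]
  have hsub : n + 1 - (X.length + 1) = e1 - 1 := by omega
  rw [hsub, hwm1]
  have hpow : (n + 2) ^ e1 = (n + 2) ^ (e1 - 1) * (n + 2) := by
    conv_lhs => rw [show e1 = (e1 - 1) + 1 by omega]
    rw [pow_succ]
  have key : pvWgt n i * (n + 2) ^ e1 + (n + 1) * (n + 2) ^ (e1 - 1) <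
      pvWgt n c * (n + 2) ^ e1 := by
    calc pvWgt n i * (n + 2) ^ e1 + (n + 1) * (n + 2) ^ (e1 - 1)
        < pvWgt n i * (n + 2) ^ e1 + (n + 2) * (n + 2) ^ (e1 - 1) := by
          have : (n + 1) * (n + 2) ^ (e1 - 1) < (n + 2) * (n + 2) ^ (e1 - 1) :=
            Nat.mul_lt_mul_of_lt_of_le (by omega) (le_refl _) hP
          omega
      _ = (pvWgt n i + 1) * (n + 2) ^ e1 := by rw [hpow]; ring
      _ ≤ pvWgt n c * (n + 2) ^ e1 := Nat.mul_le_mul_right _ hwc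
  omega

lemma pvPhi_pop (arr X : List Int) (c : Int) (_hc : -1 ≤ c) (hcn : c ≤ (arr.length : Int) - 1) :
    pvPhi arr X < pvPhi arr (X ++ [c]) := by
  unfold pvPhi
  rw [pvPhiA_append]
  have h1 : 1 ≤ pvWgt arr.length c := by simp only [pvWgt]; omega
  have h2 : 0 < (arr.length + 2) ^ (arr.length + 1 - X.length) := pow_pos (by omega) _
  have := Nat.mul_le_mul h1 h2
  omega

lemma pvOuterA_nil (arr : List Int) (fuel : Nat) (res : List (List Int)) :
    pvOuterA arr fuel [] res = res := by
  cases fuel <;> simp [pvOuterA]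

lemma pvOuter_eq (arr : List Int) :
    ∀ fuel X (c : Int) res, pvGood arr X → -1 ≤ c → c ≤ (arr.length : Int) - 1 →
      pvPhi arr (X ++ [c]) ≤ fuel →
      pvOuterA arr fuel (X ++ [c]) res =
        res ++ pvBktB arr (arr.length + 1 - X.length) X (pvRng arr c) ++
          pvLevelsUpR arr X.reverse := by
  intro fuel
  induction fuel with
  | zero =>
    intro X c res hgood hc hcn hphi
    exact absurd hphi (by have := pvPhi_pop arr X c hc hcn; omega)
  | succ fuel ih =>
    intro X c res hgood hc hcn hphi
    have hXlen := pvGood_length_le arr X hgood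
    have hF : arr.length + 1 - X.length = (arr.length - X.length) + 1 := by omega
    rw [pvOuterA, if_pos (by simp), pvInnerLoopA, pvGet_concat_neg_one]
    rcases pvInner_scan arr X (arr.length - X.length) ((arr.length : Int) - 1 - c).toNat c hc rfl with
      ⟨i, heq, hci, h0, hin, hok, hscan⟩ | ⟨z, heq, hdl, hnil⟩
    · rw [heq]
      dsimp only
      have hgood2 : pvGood arr (X ++ [i]) := by
        constructor
        · intro a ha
          rcases List.mem_append.mp ha with ha | ha
          · exact hgood.1 a ha
          · simp at ha; subst ha; exact ⟨h0, hin⟩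
        · rw [List.isChain_append]
          refine ⟨hgood.2, by simp, ?_⟩
          intro x hx y hy
          simp only [List.head?_cons, Option.mem_some_iff] at hy
          subst hy
          rw [← pvOkB_last arr X x i hx]
          exact hok
      have hphi2 : pvPhi arr ((X ++ [i]) ++ [-1]) ≤ fuel := by
        have := pvPhi_push arr X c i hc hci hin hXlen
        omega
      have h2 := ih (X ++ [i]) (-1) (if 2 < (X ++ [i]).length then
          res ++ [(X ++ [i]).map (fun j => pvGet arr j)] else res)
        hgood2 (by omega) (by omega) hphi2
      rw [h2, hF, hscan, pvRng_neg_one]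
      have hlen2 : (X ++ [i]).length = X.length + 1 := by simp
      have hf2 : arr.length + 1 - (X ++ [i]).length = arr.length - X.length := by
        rw [hlen2]; omega
      rw [hf2]
      have hrev : (X ++ [i]).reverse = i :: X.reverse := by simp
      rw [hrev, pvLevelsUpR]
      simp only [List.length_reverse, List.reverse_reverse, hF]
      by_cases hrec : 2 ≤ X.length <;> simp [hrec, List.append_assoc]
    · rw [heq]
      dsimp only
      rw [hdl]
      rcases List.eq_nil_or_concat X with rfl | ⟨X', c', rfl⟩
      · rw [pvOuterA_nil]
        simp only [List.length_nil, Nat.sub_zero] at hnil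
        simp [pvLevelsUpR, hnil]
      · simp only [List.concat_eq_append] at *
        have hc'mem : c' ∈ X' ++ [c'] := by simp
        have hc'b := hgood.1 c' hc'mem
        have hgood' : pvGood arr X' := by
          refine ⟨fun a ha => hgood.1 a (by simp [ha]), ?_⟩
          exact hgood.2.prefix (List.prefix_append _ _)
        have hphi' : pvPhi arr (X' ++ [c']) ≤ fuel := by
          have := pvPhi_pop arr (X' ++ [c']) c hc hcn
          omega
        rw [ih X' c' res hgood' (by omega) (by omega) hphi', hF, hnil]
        have hrev : (X' ++ [c']).reverse = c' :: X'.reverse := by simp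
        rw [hrev, pvLevelsUpR]
        simp [List.append_assoc]

-- ===== VERDICT (by name: the statement is the Claim_ definition above) =====
theorem find_subsequences_bkt_iter_spec : Claim_equal_find_subsequences_bkt_iter := by
  intro arr _
  show find_subsequences_bkt_iter arr = find_subsequences_bkt_iter_alt arr
  unfold find_subsequences_bkt_iter find_subsequences_bkt_iter_alt
  have hfuel : pvPhi arr [-1] ≤ (arr.length + 2) ^ (arr.length + 2) := by
    have h1 : pvPhi arr [-1] = pvWgt arr.length (-1) * (arr.length + 2) ^ (arr.length + 1) := by
      simp [pvPhi, pvPhiA]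
    have h2 : pvWgt arr.length (-1) = arr.length + 1 := by simp [pvWgt]
    rw [h1, h2, pow_succ]
    exact le_trans (Nat.mul_le_mul_right _ (by omega)) (le_of_eq (Nat.mul_comm _ _))
  have h := pvOuter_eq arr ((arr.length + 2) ^ (arr.length + 2)) [] (-1) []
    ⟨by simp, by simp⟩ (by omega) (by omega) (by simpa using hfuel)
  simp only [List.nil_append] at h
  rw [h, pvRng_neg_one]
  simp [pvLevelsUpR]
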